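-- pv_equiv track=rewrite | github.com/Jurgenmn/programing_notes | Jamal/calculator/edabit.py | cap_to_front
-- ===== SOURCE A (Python) =====
-- def cap_to_front(name):
--     new_word = ""
--     for i in name:
--         if i.isupper():
--             new_word = new_word + i
--             # new_word.format(i)
--     for i in name:
--         if i.islower():
--             new_word = new_word + i
--             # new_word.format(i)
--     return new_word
-- ===== SOURCE B (Python) =====
-- def cap_to_front(name):
--     uppers = []
--     lowers = []
--     for c in name:
--         if c.isupper():
--             uppers.append(c)
--         elif c.islower():
--             lowers.append(c)
--     return "".join(uppers + lowers)
-- ===== Notes on version B (the rewrite author's own statement) =====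
-- stated objective: simpler
-- what changed: Single pass maintaining two list accumulators (uppercase and lowercase) joined at the end, instead of two full scans of the string each extending the result by string concatenation.
import Mathlib
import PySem

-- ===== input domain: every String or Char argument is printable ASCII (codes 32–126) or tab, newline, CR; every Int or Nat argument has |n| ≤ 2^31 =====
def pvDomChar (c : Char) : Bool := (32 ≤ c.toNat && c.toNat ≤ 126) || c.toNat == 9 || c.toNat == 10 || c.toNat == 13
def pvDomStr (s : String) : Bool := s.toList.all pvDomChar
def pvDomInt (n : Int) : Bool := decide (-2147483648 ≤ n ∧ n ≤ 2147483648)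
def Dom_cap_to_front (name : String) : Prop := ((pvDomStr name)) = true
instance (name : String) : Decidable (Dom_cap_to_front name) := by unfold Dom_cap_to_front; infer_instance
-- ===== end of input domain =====

-- B: one pass with two accumulators instead of A's two scans; return value only, simpler decomposition.

-- ===== PORT A =====
-- A: two passes over the string, first collecting uppercase, then lowercase.
def cap_to_front (name : String) : String :=
  let w1 := name.toList.foldl
    (fun acc c => if PySem.Chars.isupper c then acc ++ [c] else acc) []
  let w2 := name.toList.foldl
    (fun acc c => if PySem.Chars.islower c then acc ++ [c] else acc) w1
  String.mk w2

-- ===== PORT B =====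
-- B: single pass carrying a pair of accumulators (uppers, lowers), joined at the end.
def cap_to_front_alt (name : String) : String :=
  let p := name.toList.foldl
    (fun (p : List Char × List Char) c =>
      if PySem.Chars.isupper c then (p.1 ++ [c], p.2)
      else if PySem.Chars.islower c then (p.1, p.2 ++ [c])
      else p) ([], [])
  String.mk (p.1 ++ p.2)

-- ===== PRECONDITION & SPEC =====
def Spec_cap_to_front (name : String) (out : String) : Prop := out = cap_to_front_alt name
instance (name : String) (out : String) : Decidable (Spec_cap_to_front name out) := by unfold Spec_cap_to_front; infer_instance

-- ===== CLAIM (what is proved, stated in full; the proofs are below) =====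
def Claim_equal_cap_to_front : Prop := ∀ (name : String), Dom_cap_to_front name → Spec_cap_to_front name (cap_to_front name)

-- ===== LEMMAS AND PROOFS =====

-- a char is never both uppercase and lowercase
theorem not_upper_and_lower (c : Char) (h : PySem.Chars.isupper c = true) :
    PySem.Chars.islower c = false := by
  simp only [PySem.Chars.isupper, Bool.and_eq_true, decide_eq_true_eq] at h
  simp only [PySem.Chars.islower, Bool.and_eq_false_iff, decide_eq_false_iff_not, not_le]
  left
  exact lt_of_le_of_lt h.2 (by decide)

-- B's single pass computes the pair of filters
theorem alt_fold_eq (l : List Char) (us ls : List Char) :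
    l.foldl (fun (p : List Char × List Char) c =>
      if PySem.Chars.isupper c then (p.1 ++ [c], p.2)
      else if PySem.Chars.islower c then (p.1, p.2 ++ [c])
      else p) (us, ls)
    = (us ++ l.filter PySem.Chars.isupper, ls ++ l.filter PySem.Chars.islower) := by
  induction l generalizing us ls with
  | nil => simp
  | cons c t ih =>
    by_cases hu : PySem.Chars.isupper c = true
    · simp [List.foldl_cons, hu, not_upper_and_lower c hu, ih]
    · by_cases hl : PySem.Chars.islower c = true
      · simp [List.foldl_cons, hu, hl, ih]
      · simp [List.foldl_cons, hu, hl, ih]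

-- ===== VERDICT (by name: the statement is the Claim_ definition above) =====
theorem cap_to_front_spec : Claim_equal_cap_to_front := by
  intro name _
  unfold Spec_cap_to_front cap_to_front cap_to_front_alt
  simp [PySem.List.foldl_append_if_eq_filter, alt_fold_eq]
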